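-- pv_equiv track=rewrite | github.com/nakshatra-7/AutoApply.AI--Job-Screening-Applying-AI-Agent | app/services/portals/lever.py | _pick_option
-- ===== SOURCE A (Python) =====
-- from typing import List, Optional
--
-- def _pick_option(value: str, options: List[str]) -> str:
--     def norm(text: str) -> str:
--         return text.strip().lower()
--
--     val = norm(value)
--     for option in options:
--         if norm(option) == val:
--             return option
--     yes_set = {"yes", "y", "true", "1"}
--     no_set = {"no", "n", "false", "0"}
--     if val in yes_set or val in no_set:
--         target = yes_set if val in yes_set else no_set
--         for option in options:
--             if norm(option) in target:
--                 return option
--     return value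
-- ===== SOURCE B (Python) =====
-- def _pick_option(value, options):
--     def norm(text):
--         return text.strip().lower()
--
--     val = norm(value)
--     yes_set = {"yes", "y", "true", "1"}
--     no_set = {"no", "n", "false", "0"}
--     if val in yes_set:
--         target = yes_set
--     elif val in no_set:
--         target = no_set
--     else:
--         target = None
--     candidate = None
--     for option in options:
--         n = norm(option)
--         if n == val:
--             return option
--         if target is not None and candidate is None and n in target:
--             candidate = option
--     return candidate if candidate is not None else value
-- ===== Notes on version B (the rewrite author's own statement) =====
-- stated objective: alternative
-- what changed: Replaced A's two sequential scans (exact match, then boolean-synonym match) by a single pass that returns on an exact match and remembers the first boolean-synonym candidate, chosen against a target set computed up front.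
import Mathlib
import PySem

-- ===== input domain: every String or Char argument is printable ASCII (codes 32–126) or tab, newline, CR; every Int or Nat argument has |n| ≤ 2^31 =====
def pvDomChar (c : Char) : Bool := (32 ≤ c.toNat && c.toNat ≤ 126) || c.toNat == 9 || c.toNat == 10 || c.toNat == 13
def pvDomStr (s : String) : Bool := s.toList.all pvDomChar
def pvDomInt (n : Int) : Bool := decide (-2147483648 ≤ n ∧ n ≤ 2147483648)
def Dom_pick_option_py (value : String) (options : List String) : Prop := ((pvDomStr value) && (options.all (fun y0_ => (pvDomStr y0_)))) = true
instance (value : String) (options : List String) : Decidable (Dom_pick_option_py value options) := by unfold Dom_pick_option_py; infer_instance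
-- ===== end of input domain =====

-- B merges A's two sequential scans into a single pass (exact match returns at once,
-- the first boolean-synonym candidate is remembered); alternative decomposition, same cost.

-- ===== PORT A =====
def pvNormA (text : String) : String := PySem.Str.lower (PySem.Str.strip text)

-- first loop of A: first option whose norm equals val
def pvALoop1 (val : String) : List String → Option String
  | [] => none
  | o :: rest => if pvNormA o = val then some o else pvALoop1 val rest

-- second loop of A: first option whose norm is in the target set
def pvALoop2 (target : PySem.Set String) : List String → Option String
  | [] => none
  | o :: rest => if PySem.Set.contains target (pvNormA o) then some o else pvALoop2 target rest

def pick_option_py (value : String) (options : List String) : String :=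
  let val := pvNormA value
  match pvALoop1 val options with
  | some o => o
  | none =>
    let yes_set : PySem.Set String := PySem.Set.ofList ["yes", "y", "true", "1"]
    let no_set : PySem.Set String := PySem.Set.ofList ["no", "n", "false", "0"]
    if PySem.Set.contains yes_set val || PySem.Set.contains no_set val then
      let target := if PySem.Set.contains yes_set val then yes_set else no_set
      match pvALoop2 target options with
      | some o => o
      | none => value
    else value

-- ===== PORT B =====
def pvNormB (text : String) : String := PySem.Str.lower (PySem.Str.strip text)

-- B's single pass: return on exact match, remember the first target-set candidate
def pvBLoop (value val : String) (target : Option (PySem.Set String)) (candidate : Option String) :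
    List String → String
  | [] => match candidate with | some c => c | none => value
  | o :: rest =>
    let n := pvNormB o
    if n = val then o
    else
      let candidate' :=
        match target, candidate with
        | some t, none => if PySem.Set.contains t n then some o else none
        | _, _ => candidate
      pvBLoop value val target candidate' rest

def pick_option_py_alt (value : String) (options : List String) : String :=
  let val := pvNormB value
  let yes_set : PySem.Set String := PySem.Set.ofList ["yes", "y", "true", "1"]
  let no_set : PySem.Set String := PySem.Set.ofList ["no", "n", "false", "0"]
  let target : Option (PySem.Set String) :=
    if PySem.Set.contains yes_set val then some yes_set
    else if PySem.Set.contains no_set val then some no_set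
    else none
  pvBLoop value val target none options

-- ===== PRECONDITION & SPEC =====
def Spec_pick_option_py (value : String) (options : List String) (out : String) : Prop := out = pick_option_py_alt value options
instance (value : String) (options : List String) (out : String) : Decidable (Spec_pick_option_py value options out) := by unfold Spec_pick_option_py; infer_instance

-- ===== CLAIM (what is proved, stated in full; the proofs are below) =====
def Claim_equal_pick_option_py : Prop := ∀ (value : String) (options : List String), Dom_pick_option_py value options → Spec_pick_option_py value options (pick_option_py value options)

-- ===== LEMMAS AND PROOFS =====
theorem pvBLoop_eq (value val : String) (target : Option (PySem.Set String))
    (candidate : Option String) (options : List String) :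
    pvBLoop value val target candidate options =
      match pvALoop1 val options with
      | some o => o
      | none =>
        match candidate with
        | some c => c
        | none =>
          match target with
          | some t =>
            match pvALoop2 t options with
            | some o => o
            | none => value
          | none => value := by
  induction options generalizing candidate with
  | nil => cases candidate <;> cases target <;> simp [pvBLoop, pvALoop1, pvALoop2]
  | cons o rest ih =>
    simp only [pvBLoop]
    by_cases hx : pvNormB o = val
    · simp [pvALoop1, pvNormB, pvNormA] at hx ⊢
      simp [hx]
    · have hx' : ¬ pvNormA o = val := hx
      simp only [if_neg hx]
      rw [ih]
      cases target with
      | none =>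
        cases candidate <;> simp [pvALoop1, if_neg hx']
      | some t =>
        cases candidate with
        | some c => simp [pvALoop1, if_neg hx']
        | none =>
          have hnb : pvNormB o = pvNormA o := rfl
          by_cases ht : pvNormA o ∈ t
          · simp [pvALoop1, pvALoop2, if_neg hx', hnb, ht]
          · simp [pvALoop1, pvALoop2, if_neg hx', hnb, ht]

-- ===== VERDICT (by name: the statement is the Claim_ definition above) =====
theorem pick_option_py_spec : Claim_equal_pick_option_py := by
  intro value options _
  show pick_option_py value options = pick_option_py_alt value options
  unfold pick_option_py pick_option_py_alt
  rw [pvBLoop_eq]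
  have hval : pvNormB value = pvNormA value := rfl
  rw [hval]
  set val := pvNormA value
  set yes_set : PySem.Set String := PySem.Set.ofList ["yes", "y", "true", "1"]
  set no_set : PySem.Set String := PySem.Set.ofList ["no", "n", "false", "0"]
  by_cases hy : val ∈ yes_set
  · simp [hy]
  · by_cases hn : val ∈ no_set
    · simp [hy, hn]
    · simp [hy, hn]
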